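-- pv_equiv track=rewrite | github.com/adrn-mm/SNA-Twitter-Edtech | src/code-library/networkx/code.py | _single_shortest_path_length
-- ===== SOURCE A (Python) =====
-- def _single_shortest_path_length(adj, firstlevel, cutoff):
--     """Yields (node, level) in a breadth first search"""
--     seen = {}  # level (number of hops) when seen in BFS
--     level = 0  # the current level
--     nextlevel = firstlevel  # dict of nodes to check at next level
--
--     while nextlevel and cutoff >= level:
--         thislevel = nextlevel  # advance to next level
--         nextlevel = {}  # and start a new list (fringe)
--         for v in thislevel:
--             if v not in seen:
--                 seen[v] = level  # set the level of vertex v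
--                 nextlevel.update(adj[v])  # add neighbors of v
--                 yield (v, level)
--         level += 1
--     del seen
-- ===== SOURCE B (Python) =====
-- def _single_shortest_path_length(adj, firstlevel, cutoff):
--     """Yields (node, level) in a breadth first search.
--
--     Single-loop FIFO BFS over one queue instead of A's nested
--     level-by-level dict swapping; seen is marked on dequeue so the
--     yield order and adj accesses match the level-synchronous version.
--     """
--     seen = {}
--     queue = [(v, 0) for v in firstlevel]
--     i = 0
--     while i < len(queue):
--         v, level = queue[i]
--         i += 1
--         if v in seen or level > cutoff:
--             continue
--         seen[v] = level
--         yield (v, level)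
--         for w in adj[v]:
--             queue.append((w, level + 1))
-- ===== Notes on version B (the rewrite author's own statement) =====
-- stated objective: alternative
-- what changed: Replaces A's two nested loops with level-synchronized dict swapping (thislevel/nextlevel rebuilt each round, dedup via dict update) by a single-loop FIFO BFS over one growing queue seeded with (node,0), marking seen on dequeue, so the per-level fringe dicts disappear entirely.
-- outside the precondition, e.g. on _single_shortest_path_length({0: {1: 1}}, {0: 1}, 0): A returns [(0, 0)], B returns [(0, 0)]
import Mathlib
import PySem

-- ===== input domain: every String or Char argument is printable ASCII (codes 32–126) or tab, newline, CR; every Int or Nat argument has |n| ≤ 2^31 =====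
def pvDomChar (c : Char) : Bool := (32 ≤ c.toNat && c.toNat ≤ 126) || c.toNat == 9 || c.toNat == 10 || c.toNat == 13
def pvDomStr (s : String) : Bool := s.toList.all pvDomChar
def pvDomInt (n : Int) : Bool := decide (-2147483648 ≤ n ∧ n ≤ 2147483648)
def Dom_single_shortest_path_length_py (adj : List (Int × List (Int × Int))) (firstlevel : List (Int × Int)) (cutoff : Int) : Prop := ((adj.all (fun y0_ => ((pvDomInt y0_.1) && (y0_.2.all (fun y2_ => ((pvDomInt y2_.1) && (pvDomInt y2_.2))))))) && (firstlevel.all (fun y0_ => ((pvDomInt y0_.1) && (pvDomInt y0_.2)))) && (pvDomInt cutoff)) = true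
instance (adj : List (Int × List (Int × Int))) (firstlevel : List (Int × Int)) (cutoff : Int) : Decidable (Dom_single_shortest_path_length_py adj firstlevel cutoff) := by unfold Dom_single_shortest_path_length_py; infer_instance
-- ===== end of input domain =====

-- B replaces A's two nested loops (level dicts swapped each round) by a single-loop FIFO
-- BFS over one queue; same return value, no side effects on the arguments.

-- ===== PORT A =====
-- adj[v]: Python raises KeyError when v is missing; Pre_ excludes those inputs, the
-- port uses getD [] there (unreachable under Pre_).
def pvAdjGet (adj : List (Int × List (Int × Int))) (v : Int) : List (Int × Int) :=
  (PySem.Dict.get? (PySem.Dict.mk adj) v).getD []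

-- the inner 'for v in thislevel' loop of A (state: nextlevel, seen, yielded output)
def pvAInner (adj : List (Int × List (Int × Int))) (level : Int) :
    List (Int × Int) → PySem.Dict Int Int → PySem.Dict Int Int → List (Int × Int) →
    PySem.Dict Int Int × PySem.Dict Int Int × List (Int × Int)
  | [], nextlevel, seen, acc => (nextlevel, seen, acc)
  | (v, _) :: rest, nextlevel, seen, acc =>
    if (PySem.Dict.get? seen v).isNone then
      pvAInner adj level rest (PySem.Dict.update nextlevel (pvAdjGet adj v))
        (PySem.Dict.insert seen v level) (acc ++ [(v, level)])
    else
      pvAInner adj level rest nextlevel seen acc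

-- the outer 'while nextlevel and cutoff >= level' loop of A
def pvALoop (adj : List (Int × List (Int × Int))) (cutoff : Int)
    (nextlevel : PySem.Dict Int Int) (seen : PySem.Dict Int Int) (level : Int)
    (acc : List (Int × Int)) : List (Int × Int) :=
  if _h : nextlevel.items ≠ [] ∧ level ≤ cutoff then
    let r := pvAInner adj level nextlevel.items PySem.Dict.empty seen acc
    pvALoop adj cutoff r.1 r.2.1 (level + 1) r.2.2
  else acc
termination_by (cutoff + 1 - level).toNat
decreasing_by omega

def single_shortest_path_length_py (adj : List (Int × List (Int × Int))) (firstlevel : List (Int × Int)) (cutoff : Int) : List (Int × Int) :=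
  pvALoop adj cutoff (PySem.Dict.mk firstlevel) PySem.Dict.empty 0 []

-- ===== PORT B =====
-- termination measure for the queue loop: queue length plus the weight of the
-- not-yet-seen adjacency keys (each expansion consumes its node's weight)
def pvPhi (adj : List (Int × List (Int × Int))) (seen : PySem.Dict Int Int)
    (queue : List (Int × Int)) : Nat :=
  queue.length +
    ∑ k ∈ (adj.map Prod.fst).toFinset.filter (fun k => PySem.Dict.get? seen k = none),
      ((pvAdjGet adj k).length + 1)

lemma pvPhi_expand (adj : List (Int × List (Int × Int))) (seen : PySem.Dict Int Int)
    (v level : Int) (rest : List (Int × Int)) (h : PySem.Dict.get? seen v = none) :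
    pvPhi adj (PySem.Dict.insert seen v level)
      (rest ++ (pvAdjGet adj v).map (fun p => (p.1, level + 1))) <
    pvPhi adj seen ((v, level) :: rest) := by
  have hF : (adj.map Prod.fst).toFinset.filter
        (fun k => PySem.Dict.get? (PySem.Dict.insert seen v level) k = none) =
      ((adj.map Prod.fst).toFinset.filter (fun k => PySem.Dict.get? seen k = none)).erase v := by
    ext k
    simp only [Finset.mem_filter, Finset.mem_erase, PySem.Dict.get?_insert]
    by_cases hk : k = v <;> simp [hk]
  by_cases hv : v ∈ (adj.map Prod.fst).toFinset
  · have hvF : v ∈ (adj.map Prod.fst).toFinset.filter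
        (fun k => PySem.Dict.get? seen k = none) := by
      simp [Finset.mem_filter, hv, h]
    have hsum : ∑ x ∈ ((adj.map Prod.fst).toFinset.filter
          (fun k => PySem.Dict.get? seen k = none)).erase v, ((pvAdjGet adj x).length + 1)
          + ((pvAdjGet adj v).length + 1)
        = ∑ x ∈ (adj.map Prod.fst).toFinset.filter
          (fun k => PySem.Dict.get? seen k = none), ((pvAdjGet adj x).length + 1) :=
      Finset.sum_erase_add _ _ hvF
    simp only [pvPhi, hF, List.length_append, List.length_map, List.length_cons]
    omega
  · have hnil : pvAdjGet adj v = [] := by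
      have : PySem.Dict.get? (PySem.Dict.mk adj) v = none := by
        rw [PySem.Dict.get?_eq_none_iff_not_mem_keys]
        simpa [PySem.Dict.keys] using hv
      simp [pvAdjGet, this]
    have herase : ((adj.map Prod.fst).toFinset.filter
        (fun k => PySem.Dict.get? seen k = none)).erase v =
        (adj.map Prod.fst).toFinset.filter (fun k => PySem.Dict.get? seen k = none) := by
      apply Finset.erase_eq_of_notMem
      simp [Finset.mem_filter, hv]
    simp only [pvPhi, hF, herase, hnil, List.length_append, List.length_map,
      List.length_cons, List.length_nil]
    omega

-- the single 'while i < len(queue)' loop of B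
def pvBLoop (adj : List (Int × List (Int × Int))) (cutoff : Int)
    (queue : List (Int × Int)) (seen : PySem.Dict Int Int)
    (acc : List (Int × Int)) : List (Int × Int) :=
  match queue with
  | [] => acc
  | (v, level) :: rest =>
    if h : (PySem.Dict.get? seen v).isSome ∨ cutoff < level then
      pvBLoop adj cutoff rest seen acc
    else
      pvBLoop adj cutoff (rest ++ (pvAdjGet adj v).map (fun p => (p.1, level + 1)))
        (PySem.Dict.insert seen v level) (acc ++ [(v, level)])
termination_by pvPhi adj seen queue
decreasing_by
  · simp only [pvPhi, List.length_cons]; omega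
  · exact pvPhi_expand adj seen v level rest
      (by simpa [Option.not_isSome_iff_eq_none] using (not_or.mp h).1)

def single_shortest_path_length_py_alt (adj : List (Int × List (Int × Int))) (firstlevel : List (Int × Int)) (cutoff : Int) : List (Int × Int) :=
  pvBLoop adj cutoff (firstlevel.map (fun p => (p.1, 0))) PySem.Dict.empty []

-- ===== PRECONDITION & SPEC =====
-- Pre_ excludes (a) dict arguments whose association lists repeat a key (not a Python
-- dict) and (b) graphs referencing a node that is not a key of adj — there Python A
-- raises KeyError when it expands the missing node; the closure condition (b) is
-- conservative, so it also excludes some inputs where the missing node is never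
-- expanded and A returns (B returns the same value there).
def Pre_single_shortest_path_length_py (adj : List (Int × List (Int × Int))) (firstlevel : List (Int × Int)) (cutoff : Int) : Prop :=
  (adj.map Prod.fst).Nodup ∧ (firstlevel.map Prod.fst).Nodup ∧
    (cutoff < 0 ∨ firstlevel = [] ∨
      ((∀ k ∈ firstlevel.map Prod.fst, k ∈ adj.map Prod.fst) ∧
       (∀ p ∈ adj, ∀ q ∈ p.2, q.1 ∈ adj.map Prod.fst)))
instance (adj : List (Int × List (Int × Int))) (firstlevel : List (Int × Int)) (cutoff : Int) : Decidable (Pre_single_shortest_path_length_py adj firstlevel cutoff) := by unfold Pre_single_shortest_path_length_py; infer_instance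

def pvWitness_single_shortest_path_length_py : (List (Int × List (Int × Int))) × (List (Int × Int)) × Int :=
  ([(0, [(1, 1)]), (1, [])], [(0, 7)], 5)

def Spec_single_shortest_path_length_py (adj : List (Int × List (Int × Int))) (firstlevel : List (Int × Int)) (cutoff : Int) (out : List (Int × Int)) : Prop := out = single_shortest_path_length_py_alt adj firstlevel cutoff
instance (adj : List (Int × List (Int × Int))) (firstlevel : List (Int × Int)) (cutoff : Int) (out : List (Int × Int)) : Decidable (Spec_single_shortest_path_length_py adj firstlevel cutoff out) := by unfold Spec_single_shortest_path_length_py; infer_instance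

-- ===== CLAIM (what is proved, stated in full; the proofs are below) =====
def Claim_equal_single_shortest_path_length_py : Prop := ∀ (adj : List (Int × List (Int × Int))) (firstlevel : List (Int × Int)) (cutoff : Int), Dom_single_shortest_path_length_py adj firstlevel cutoff → Pre_single_shortest_path_length_py adj firstlevel cutoff → Spec_single_shortest_path_length_py adj firstlevel cutoff (single_shortest_path_length_py adj firstlevel cutoff)

-- ===== LEMMAS AND PROOFS =====

lemma pvBLoop_nil (adj : List (Int × List (Int × Int))) (cutoff : Int)
    (seen : PySem.Dict Int Int) (acc : List (Int × Int)) :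
    pvBLoop adj cutoff [] seen acc = acc := by
  rw [pvBLoop]

lemma pvBLoop_skip (adj : List (Int × List (Int × Int))) (cutoff v level : Int)
    (rest : List (Int × Int)) (seen : PySem.Dict Int Int) (acc : List (Int × Int))
    (h : (PySem.Dict.get? seen v).isSome ∨ cutoff < level) :
    pvBLoop adj cutoff ((v, level) :: rest) seen acc = pvBLoop adj cutoff rest seen acc := by
  rw [pvBLoop]; simp [h]

lemma pvBLoop_go (adj : List (Int × List (Int × Int))) (cutoff v level : Int)
    (rest : List (Int × Int)) (seen : PySem.Dict Int Int) (acc : List (Int × Int))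
    (h : ¬((PySem.Dict.get? seen v).isSome ∨ cutoff < level)) :
    pvBLoop adj cutoff ((v, level) :: rest) seen acc =
      pvBLoop adj cutoff (rest ++ (pvAdjGet adj v).map (fun p => (p.1, level + 1)))
        (PySem.Dict.insert seen v level) (acc ++ [(v, level)]) := by
  rw [pvBLoop]; simp [h]


-- filters on the same list commute
lemma pvFilter_comm (p q : Int → Bool) (l : List Int) :
    (l.filter p).filter q = (l.filter q).filter p := by
  simp only [List.filter_filter]
  exact List.filter_congr (fun x _ => by rw [Bool.and_comm])

-- set(xs) minus x is set of xs with x filtered out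
lemma pvOfList_filter_ne (x : Int) : ∀ xs : List Int,
    PySem.Set.ofList (xs.filter (fun y => !(y == x))) =
      PySem.Set.discard (PySem.Set.ofList xs) x := by
  intro xs
  induction xs with
  | nil => simp [PySem.Set.ofList_nil, PySem.Set.discard]
  | cons y t ih =>
    by_cases hyx : y = x
    · subst hyx
      rw [show ((y :: t).filter (fun z => !(z == y))) = t.filter (fun z => !(z == y)) by
            simp]
      rw [ih, PySem.Set.ofList_cons]
      simp [PySem.Set.discard, List.filter_filter]
    · rw [show ((y :: t).filter (fun z => !(z == x))) = y :: t.filter (fun z => !(z == x)) by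
            simp [hyx]]
      rw [PySem.Set.ofList_cons, PySem.Set.ofList_cons, ih]
      simp only [PySem.Set.discard]
      rw [show (y :: List.filter (fun z => !(z == y)) (PySem.Set.ofList t) : List Int).filter
            (fun z => !(z == x)) = y :: ((PySem.Set.ofList t).filter (fun z => !(z == y))).filter
            (fun z => !(z == x)) by simp [hyx]]
      rw [pvFilter_comm]

-- entries whose node is already seen (or whose level exceeds the cutoff) can be
-- deleted from the same-level prefix of the queue
lemma pvB_filt (adj : List (Int × List (Int × Int))) (cutoff v l : Int) :
    ∀ (xs : List Int) (q2 : List (Int × Int)) (seen : PySem.Dict Int Int)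
      (acc : List (Int × Int)),
      ((PySem.Dict.get? seen v).isSome ∨ cutoff < l) →
      pvBLoop adj cutoff (xs.map (fun x => (x, l)) ++ q2) seen acc =
        pvBLoop adj cutoff ((xs.filter (fun x => !(x == v))).map (fun x => (x, l)) ++ q2) seen acc := by
  intro xs
  induction xs with
  | nil => intro q2 seen acc _; rfl
  | cons y t ih =>
    intro q2 seen acc h
    by_cases hyv : y = v
    · subst hyv
      rw [show ((y :: t).filter (fun x => !(x == y))) = t.filter (fun x => !(x == y)) by simp]
      rw [List.map_cons, List.cons_append, pvBLoop_skip _ _ _ _ _ _ _ h]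
      exact ih q2 seen acc h
    · rw [show ((y :: t).filter (fun x => !(x == v))) = y :: t.filter (fun x => !(x == v)) by
          simp [hyv]]
      by_cases hc : (PySem.Dict.get? seen y).isSome ∨ cutoff < l
      · rw [List.map_cons, List.cons_append, pvBLoop_skip _ _ _ _ _ _ _ hc,
            List.map_cons, List.cons_append, pvBLoop_skip _ _ _ _ _ _ _ hc]
        exact ih q2 seen acc h
      · rw [List.map_cons, List.cons_append, pvBLoop_go _ _ _ _ _ _ _ hc,
            List.map_cons, List.cons_append, pvBLoop_go _ _ _ _ _ _ _ hc]
        rw [List.append_assoc, List.append_assoc]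
        refine ih _ _ _ ?_
        rcases h with h | h
        · left
          rw [PySem.Dict.get?_insert]
          split_ifs with he
          · simp
          · exact h
        · right; exact h

-- a queue whose every entry lies beyond the cutoff yields nothing
lemma pvB_flush (adj : List (Int × List (Int × Int))) (cutoff : Int) :
    ∀ (q : List (Int × Int)) (seen : PySem.Dict Int Int) (acc : List (Int × Int)),
      (∀ p ∈ q, cutoff < p.2) → pvBLoop adj cutoff q seen acc = acc := by
  intro q
  induction q with
  | nil => intro seen acc _; exact pvBLoop_nil _ _ _ _
  | cons p t ih =>
    intro seen acc h
    obtain ⟨v, level⟩ := p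
    have hl : cutoff < level := h (v, level) (by simp)
    rw [pvBLoop_skip _ _ _ _ _ _ _ (Or.inr hl)]
    exact ih seen acc (fun p hp => h p (by simp [hp]))

-- duplicates in the same-level prefix of the queue collapse: the raw node list
-- may be replaced by its first-occurrence dedup (Python's dict-update dedup)
lemma pvB_dedup (adj : List (Int × List (Int × Int))) (cutoff l : Int) :
    ∀ (n : Nat) (xs : List Int) (q2 : List (Int × Int)) (seen : PySem.Dict Int Int)
      (acc : List (Int × Int)), xs.length ≤ n →
      pvBLoop adj cutoff (xs.map (fun x => (x, l)) ++ q2) seen acc =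
        pvBLoop adj cutoff ((PySem.Set.ofList xs).map (fun x => (x, l)) ++ q2) seen acc := by
  intro n
  induction n with
  | zero =>
    intro xs q2 seen acc hn
    have : xs = [] := List.eq_nil_of_length_eq_zero (Nat.le_zero.mp hn)
    subst this; rfl
  | succ n ih =>
    intro xs q2 seen acc hn
    match xs with
    | [] => rfl
    | x :: t =>
      rw [PySem.Set.ofList_cons, ← pvOfList_filter_ne]
      have hlen : (t.filter (fun y => !(y == x))).length ≤ n := by
        have := List.length_filter_le (fun y => !(y == x)) t
        simp only [List.length_cons] at hn
        omega
      by_cases hc : (PySem.Dict.get? seen x).isSome ∨ cutoff < l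
      · rw [List.map_cons, List.cons_append, pvBLoop_skip _ _ _ _ _ _ _ hc,
            List.map_cons, List.cons_append, pvBLoop_skip _ _ _ _ _ _ _ hc]
        rw [pvB_filt adj cutoff x l t q2 seen acc hc]
        exact ih _ _ _ _ hlen
      · rw [List.map_cons, List.cons_append, pvBLoop_go _ _ _ _ _ _ _ hc,
            List.map_cons, List.cons_append, pvBLoop_go _ _ _ _ _ _ _ hc]
        rw [List.append_assoc, List.append_assoc]
        have hseen' : (PySem.Dict.get? (PySem.Dict.insert seen x l) x).isSome ∨ cutoff < l := by
          left; rw [PySem.Dict.get?_insert]; simp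
        rw [pvB_filt adj cutoff x l t _ _ _ hseen']
        exact ih _ _ _ _ hlen

-- keys of a dict.update are the set-update of the keys
lemma pvKeys_update (nl : PySem.Dict Int Int) (kvs : List (Int × Int)) :
    (PySem.Dict.update nl kvs).keys = PySem.Set.update nl.keys (kvs.map Prod.fst) := by
  have h := PySem.Dict.keys_foldl_insert_key (l := kvs) (key := Prod.fst)
    (f := fun (_ : PySem.Dict Int Int) (p : Int × Int) => p.2) (d := nl)
  simpa [PySem.Dict.update] using h

-- consuming the whole same-level prefix of the queue is exactly A's inner loop:
-- the accumulated raw next-level nodes dedup to the keys of A's nextlevel dict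
lemma pvB_inner (adj : List (Int × List (Int × Int))) (cutoff l : Int) (hl : l ≤ cutoff) :
    ∀ (this : List (Int × Int)) (nl : PySem.Dict Int Int) (raw : List Int)
      (seen : PySem.Dict Int Int) (acc : List (Int × Int)),
      nl.keys = PySem.Set.ofList raw →
      ∃ raw' : List Int,
        (pvAInner adj l this nl seen acc).1.keys = PySem.Set.ofList raw' ∧
        pvBLoop adj cutoff (this.map (fun p => (p.1, l)) ++ raw.map (fun x => (x, l + 1))) seen acc
          = pvBLoop adj cutoff (raw'.map (fun x => (x, l + 1)))
              (pvAInner adj l this nl seen acc).2.1 (pvAInner adj l this nl seen acc).2.2 := by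
  intro this
  induction this with
  | nil =>
    intro nl raw seen acc hinv
    exact ⟨raw, hinv, rfl⟩
  | cons p rest ih =>
    intro nl raw seen acc hinv
    obtain ⟨v, w⟩ := p
    by_cases hs : (PySem.Dict.get? seen v).isNone
    · -- unseen: both sides expand v
      have hc : ¬((PySem.Dict.get? seen v).isSome ∨ cutoff < l) := by
        rcases Option.isNone_iff_eq_none.mp hs with h
        simp [h, not_lt.mpr hl]
      rw [show pvAInner adj l ((v, w) :: rest) nl seen acc =
            pvAInner adj l rest (PySem.Dict.update nl (pvAdjGet adj v))
              (PySem.Dict.insert seen v l) (acc ++ [(v, l)]) by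
          rw [pvAInner]; simp [hs]]
      rw [List.map_cons, List.cons_append, pvBLoop_go _ _ _ _ _ _ _ hc]
      have hinv' : (PySem.Dict.update nl (pvAdjGet adj v)).keys =
          PySem.Set.ofList (raw ++ (pvAdjGet adj v).map Prod.fst) := by
        rw [pvKeys_update, hinv, PySem.Set.ofList_append]
      obtain ⟨raw', h1, h2⟩ := ih (PySem.Dict.update nl (pvAdjGet adj v))
        (raw ++ (pvAdjGet adj v).map Prod.fst) (PySem.Dict.insert seen v l)
        (acc ++ [(v, l)]) hinv'
      refine ⟨raw', h1, ?_⟩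
      rw [← h2]
      congr 1
      rw [List.append_assoc, List.map_append, List.map_map]
      rfl
    · -- already seen: both sides skip v
      have hc : (PySem.Dict.get? seen v).isSome ∨ cutoff < l := by
        left
        cases ho : PySem.Dict.get? seen v with
        | none => rw [ho] at hs; simp at hs
        | some _ => simp
      rw [show pvAInner adj l ((v, w) :: rest) nl seen acc =
            pvAInner adj l rest nl seen acc by rw [pvAInner]; simp [hs]]
      rw [List.map_cons, List.cons_append, pvBLoop_skip _ _ _ _ _ _ _ hc]
      exact ih nl raw seen acc hinv

lemma pvOfList_eq_nil {raw : List Int} (h : PySem.Set.ofList raw = []) : raw = [] := by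
  cases raw with
  | nil => rfl
  | cons x t =>
    exfalso
    have : x ∈ PySem.Set.ofList (x :: t) := (PySem.Set.mem_ofList _ _).mpr (by simp)
    rw [h] at this
    simp at this

-- the main loop correspondence: A's level loop equals B's queue loop whenever the
-- queue is the current level's raw node list and the invariant links it to A's dict
lemma pvAB (adj : List (Int × List (Int × Int))) (cutoff : Int) :
    ∀ (n : Nat) (level : Int) (nl : PySem.Dict Int Int) (raw : List Int)
      (seen : PySem.Dict Int Int) (acc : List (Int × Int)),
      cutoff + 1 - level ≤ (n : Int) →
      nl.keys = PySem.Set.ofList raw →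
      pvALoop adj cutoff nl seen level acc =
        pvBLoop adj cutoff (raw.map (fun x => (x, level))) seen acc := by
  intro n
  induction n with
  | zero =>
    intro level nl raw seen acc hn hinv
    have hcl : cutoff < level := by omega
    rw [pvALoop, dif_neg (by intro hcon; omega)]
    rw [pvB_flush adj cutoff _ seen acc
      (by intro p hp; obtain ⟨x, -, rfl⟩ := List.mem_map.mp hp; exact hcl)]
  | succ n ih =>
    intro level nl raw seen acc hn hinv
    by_cases hcl : level ≤ cutoff
    · by_cases hnl : nl.items = []
      · have hraw : raw = [] := by
          apply pvOfList_eq_nil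
          rw [← hinv]
          simp [PySem.Dict.keys, hnl]
        subst hraw
        rw [pvALoop, dif_neg (by simp [hnl])]
        rw [show List.map (fun x => (x, level)) ([] : List Int) = [] from rfl, pvBLoop_nil]
      · rw [pvALoop, dif_pos ⟨hnl, hcl⟩]
        obtain ⟨raw', h1, h2⟩ := pvB_inner adj cutoff level hcl nl.items PySem.Dict.empty []
          seen acc (by simp [PySem.Dict.empty, PySem.Dict.keys, PySem.Set.ofList_nil])
        have hd : pvBLoop adj cutoff (raw.map (fun x => (x, level))) seen acc =
            pvBLoop adj cutoff ((PySem.Set.ofList raw).map (fun x => (x, level))) seen acc := by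
          have h := pvB_dedup adj cutoff level raw.length raw [] seen acc le_rfl
          simpa using h
        have hk : (PySem.Set.ofList raw).map (fun x => (x, level)) =
            nl.items.map (fun p => (p.1, level)) := by
          rw [← hinv]
          simp [PySem.Dict.keys, List.map_map]
        have h2' : pvBLoop adj cutoff (nl.items.map (fun p => (p.1, level))) seen acc =
            pvBLoop adj cutoff (raw'.map (fun x => (x, level + 1)))
              (pvAInner adj level nl.items PySem.Dict.empty seen acc).2.1
              (pvAInner adj level nl.items PySem.Dict.empty seen acc).2.2 := by
          have h := h2
          simpa using h
        rw [hd, hk, h2']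
        exact ih (level + 1) (pvAInner adj level nl.items PySem.Dict.empty seen acc).1 raw'
          (pvAInner adj level nl.items PySem.Dict.empty seen acc).2.1
          (pvAInner adj level nl.items PySem.Dict.empty seen acc).2.2 (by omega) h1
    · rw [pvALoop, dif_neg (by simp [hcl])]
      rw [pvB_flush adj cutoff _ seen acc
        (by intro p hp; obtain ⟨x, -, rfl⟩ := List.mem_map.mp hp; omega)]

-- ===== VERDICT (by name: the statement is the Claim_ definition above) =====
theorem single_shortest_path_length_py_spec : Claim_equal_single_shortest_path_length_py := by
  intro adj firstlevel cutoff _hdom hpre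
  unfold Spec_single_shortest_path_length_py
  unfold single_shortest_path_length_py single_shortest_path_length_py_alt
  have hnodup : (firstlevel.map Prod.fst).Nodup := hpre.2.1
  have hinv : (PySem.Dict.mk firstlevel).keys = PySem.Set.ofList (firstlevel.map Prod.fst) := by
    rw [PySem.Set.ofList_eq_self_of_nodup _ hnodup]
    rfl
  have h := pvAB adj cutoff (cutoff + 1).toNat 0 (PySem.Dict.mk firstlevel)
    (firstlevel.map Prod.fst) PySem.Dict.empty [] (by omega) hinv
  rw [h, List.map_map]
  rfl
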